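-- pv_equiv track=rewrite | github.com/kelseyj3411/SpLSI | utils/features.py | calculate_sum_of_squared_neighborhood_weights
-- ===== SOURCE A (Python) =====
-- from collections import defaultdict
--
-- def calculate_sum_of_squared_neighborhood_weights(edge_list):
--     neighborhood_weights = defaultdict(int)
--     for i, j, weight in edge_list:
--         neighborhood_weights[i] += weight
--         neighborhood_weights[j] += weight
--
--     sum_squared_weights = 0
--     for node, weights in neighborhood_weights.items():
--         squared_sum = weights**2
--         sum_squared_weights += squared_sum
--
--     return sum_squared_weights
-- ===== SOURCE B (Python) =====
-- def calculate_sum_of_squared_neighborhood_weights(edge_list):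
--     # Flatten edges into (node, weight) incidences, then sum per distinct node by scanning.
--     pairs = []
--     for i, j, weight in edge_list:
--         pairs.append((i, weight))
--         pairs.append((j, weight))
--     nodes = set(n for n, _ in pairs)
--     total = 0
--     for node in nodes:
--         s = sum(w for n, w in pairs if n == node)
--         total += s * s
--     return total
-- ===== Notes on version B (the rewrite author's own statement) =====
-- stated objective: alternative
-- what changed: Replaces the defaultdict accumulation with a flatten-to-incidence-list pass followed by a per-distinct-node scan that recomputes each node's total, so no per-node running totals are maintained in a map.
import Mathlib
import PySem

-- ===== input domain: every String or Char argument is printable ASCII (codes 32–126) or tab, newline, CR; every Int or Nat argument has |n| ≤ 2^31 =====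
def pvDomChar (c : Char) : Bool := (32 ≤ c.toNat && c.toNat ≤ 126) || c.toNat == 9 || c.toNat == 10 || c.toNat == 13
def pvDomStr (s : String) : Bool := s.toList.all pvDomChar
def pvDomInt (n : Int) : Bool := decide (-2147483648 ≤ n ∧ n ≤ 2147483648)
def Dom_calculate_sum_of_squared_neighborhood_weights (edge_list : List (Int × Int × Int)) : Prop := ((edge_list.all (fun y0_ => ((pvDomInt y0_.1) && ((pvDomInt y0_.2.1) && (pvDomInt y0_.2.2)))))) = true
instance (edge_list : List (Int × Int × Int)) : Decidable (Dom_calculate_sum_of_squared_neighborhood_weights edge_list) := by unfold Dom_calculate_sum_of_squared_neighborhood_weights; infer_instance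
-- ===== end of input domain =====

-- ===== PORT A =====
-- One honest line: B flattens edges to (node, weight) incidences and recomputes each
-- distinct node's total by a scan, instead of maintaining a defaultdict of running totals.
def calculate_sum_of_squared_neighborhood_weights (edge_list : List (Int × Int × Int)) : Int :=
  let neighborhood_weights : PySem.Dict Int Int :=
    edge_list.foldl (fun d e =>
      let d1 := d.insert e.1 (d.getD e.1 0 + e.2.2)
      d1.insert e.2.1 (d1.getD e.2.1 0 + e.2.2)) PySem.Dict.empty
  neighborhood_weights.items.foldl (fun s kv => s + kv.2 ^ 2) 0

-- ===== PORT B =====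
def calculate_sum_of_squared_neighborhood_weights_alt (edge_list : List (Int × Int × Int)) : Int :=
  let pairs : List (Int × Int) :=
    edge_list.foldl (fun acc e => acc ++ [(e.1, e.2.2), (e.2.1, e.2.2)]) []
  let nodes : PySem.Set Int := PySem.Set.ofList (pairs.map (·.1))
  nodes.foldl (fun total node =>
    let s := pairs.foldl (fun s p => if p.1 = node then s + p.2 else s) 0
    total + s * s) 0

-- ===== PRECONDITION & SPEC =====
def Spec_calculate_sum_of_squared_neighborhood_weights (edge_list : List (Int × Int × Int)) (out : Int) : Prop := out = calculate_sum_of_squared_neighborhood_weights_alt edge_list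
instance (edge_list : List (Int × Int × Int)) (out : Int) : Decidable (Spec_calculate_sum_of_squared_neighborhood_weights edge_list out) := by unfold Spec_calculate_sum_of_squared_neighborhood_weights; infer_instance

-- ===== CLAIM (what is proved, stated in full; the proofs are below) =====
def Claim_equal_calculate_sum_of_squared_neighborhood_weights : Prop := ∀ (edge_list : List (Int × Int × Int)), Dom_calculate_sum_of_squared_neighborhood_weights edge_list → Spec_calculate_sum_of_squared_neighborhood_weights edge_list (calculate_sum_of_squared_neighborhood_weights edge_list)

-- ===== LEMMAS AND PROOFS =====

-- the incidence list both programs are really about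
def pvPairs (edge_list : List (Int × Int × Int)) : List (Int × Int) :=
  edge_list.flatMap (fun e => [(e.1, e.2.2), (e.2.1, e.2.2)])

-- total weight incident to node n in an incidence list
def pvWsum (n : Int) : List (Int × Int) → Int
  | [] => 0
  | p :: ps => (if p.1 = n then p.2 else 0) + pvWsum n ps

-- A's double-insert loop over edges is a single-insert loop over the flattened incidences
theorem pvBuild_eq (edge_list : List (Int × Int × Int)) :
    ∀ d : PySem.Dict Int Int,
      edge_list.foldl (fun d e =>
        let d1 := d.insert e.1 (d.getD e.1 0 + e.2.2)
        d1.insert e.2.1 (d1.getD e.2.1 0 + e.2.2)) d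
      = (pvPairs edge_list).foldl (fun d p => d.insert p.1 (d.getD p.1 0 + p.2)) d := by
  induction edge_list with
  | nil => intro d; rfl
  | cons e rest ih =>
      intro d
      simp only [List.foldl_cons, pvPairs, List.flatMap_cons, List.foldl_append]
      exact ih _

-- lookup after the single-insert loop: running total of incident weights
theorem pvGetD_build (ps : List (Int × Int)) :
    ∀ (d : PySem.Dict Int Int) (n : Int),
      (ps.foldl (fun d p => d.insert p.1 (d.getD p.1 0 + p.2)) d).getD n 0
        = d.getD n 0 + pvWsum n ps := by
  induction ps with
  | nil => intro d n; simp [pvWsum]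
  | cons p ps ih =>
      intro d n
      simp only [List.foldl_cons, pvWsum, ih]
      by_cases h : p.1 = n
      · subst h
        rw [PySem.Dict.getD_insert_self]
        simp only [if_true]
        ring
      · rw [PySem.Dict.getD_insert_of_ne _ _ _ (Ne.symm h)]
        simp [h]

-- B's inner scan computes pvWsum
theorem pvScan_eq (n : Int) (ps : List (Int × Int)) :
    ∀ a : Int, ps.foldl (fun s p => if p.1 = n then s + p.2 else s) a = a + pvWsum n ps := by
  induction ps with
  | nil => intro a; simp [pvWsum]
  | cons p ps ih =>
      intro a
      simp only [List.foldl_cons, pvWsum, ih]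
      by_cases h : p.1 = n
      · simp only [h, if_true]
        ring
      · simp [h]

-- B's outer loop as a sum of squared totals
theorem pvOuter (ps : List (Int × Int)) (l : List Int) :
    ∀ t : Int,
      l.foldl (fun total node =>
        let s := ps.foldl (fun s p => if p.1 = node then s + p.2 else s) 0
        total + s * s) t
      = t + (l.map (fun n => pvWsum n ps ^ 2)).sum := by
  induction l with
  | nil => intro t; simp
  | cons n l ih =>
      intro t
      rw [List.foldl_cons, ih]
      simp only [pvScan_eq, Int.zero_add, List.map_cons, List.sum_cons]
      ring

-- ===== VERDICT (by name: the statement is the Claim_ definition above) =====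
theorem calculate_sum_of_squared_neighborhood_weights_spec : Claim_equal_calculate_sum_of_squared_neighborhood_weights := by
  intro el _
  unfold Spec_calculate_sum_of_squared_neighborhood_weights
  unfold calculate_sum_of_squared_neighborhood_weights calculate_sum_of_squared_neighborhood_weights_alt
  simp only [pvBuild_eq, PySem.List.foldl_append_eq_flatMap, List.nil_append]
  rw [show (el.flatMap fun e => [(e.1, e.2.2), (e.2.1, e.2.2)]) = pvPairs el from rfl]
  set ps := pvPairs el with hps
  -- A side: items fold → sum over keys
  have hnd : ((ps.foldl (fun d p => d.insert p.1 (d.getD p.1 0 + p.2)) PySem.Dict.empty : PySem.Dict Int Int)).keys.Nodup := by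
    exact PySem.Dict.nodup_keys_foldl_insert_key ps (·.1) (fun d p => d.getD p.1 0 + p.2)
      PySem.Dict.empty (by simp [PySem.Dict.keys_empty])
  have hkeys : ((ps.foldl (fun d p => d.insert p.1 (d.getD p.1 0 + p.2)) PySem.Dict.empty : PySem.Dict Int Int)).keys
      = PySem.Set.ofList (ps.map (·.1)) := by
    rw [PySem.Dict.keys_foldl_insert_key ps (·.1) (fun d p => d.getD p.1 0 + p.2) PySem.Dict.empty]
    simp [PySem.Dict.keys_empty, PySem.Set.update_nil_left]
  rw [PySem.List.foldl_add _ (fun kv : Int × Int => kv.2 ^ 2),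
      PySem.Dict.items_eq_map_keys _ hnd 0, hkeys]
  -- B side
  rw [pvOuter]
  simp only [List.map_map, Int.zero_add]
  congr 1
  apply List.map_congr_left
  intro n _
  simp only [Function.comp]
  rw [pvGetD_build]
  simp [sq]
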